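-- pv_equiv track=rewrite | github.com/nidhish1/fine_tune_svg_inference | inference/repair/repair_svg_outputs.py | extract_serialization_payload
-- ===== SOURCE A (Python) =====
-- KNOWN_MARKERS = [
--     "serialization_target:",
--     "serialization:",
--     "SVG target:",
--     "layout_target:",
-- ]
--
-- def extract_serialization_payload(text: str) -> tuple[str, str]:
--     if not text:
--         return "", "empty"
--     best_idx = None
--     best_marker = None
--     for marker in KNOWN_MARKERS:
--         i = text.find(marker)
--         if i >= 0 and (best_idx is None or i < best_idx):
--             best_idx = i
--             best_marker = marker
--     if best_idx is None or best_marker is None: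
--         return text, "no_known_marker"
--     marker_name = best_marker.rstrip(":").replace(" ", "_")
--     return text[best_idx + len(best_marker) :], f"from_{marker_name}"
-- ===== SOURCE B (Python) =====
-- KNOWN_MARKERS = [
--     "serialization_target:",
--     "serialization:",
--     "SVG target:",
--     "layout_target:",
-- ]
--
-- def extract_serialization_payload(text: str) -> tuple[str, str]:
--     if not text:
--         return "", "empty"
--     for i in range(len(text)):
--         for marker in KNOWN_MARKERS:
--             if text.startswith(marker, i):
--                 name = marker.rstrip(":").replace(" ", "_")
--                 return text[i + len(marker):], f"from_{name}"
--     return text, "no_known_marker"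
-- ===== Notes on version B (the rewrite author's own statement) =====
-- stated objective: alternative
-- what changed: Replaces the four separate str.find scans plus running-minimum bookkeeping with a single left-to-right scan that stops at the first position where any marker starts (earliest match, first marker in list order).
import Mathlib
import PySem

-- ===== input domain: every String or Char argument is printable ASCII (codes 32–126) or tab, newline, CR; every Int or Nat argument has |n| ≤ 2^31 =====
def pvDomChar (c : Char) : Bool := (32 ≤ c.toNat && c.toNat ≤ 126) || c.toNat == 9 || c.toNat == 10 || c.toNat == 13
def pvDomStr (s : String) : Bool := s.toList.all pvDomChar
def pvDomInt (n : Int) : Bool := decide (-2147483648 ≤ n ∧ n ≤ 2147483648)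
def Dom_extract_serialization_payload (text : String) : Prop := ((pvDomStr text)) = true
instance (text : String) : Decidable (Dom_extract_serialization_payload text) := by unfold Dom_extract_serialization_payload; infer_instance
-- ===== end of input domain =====

-- B replaces A's four-find-scans-plus-minimum with one left-to-right earliest-match scan (alternative decomposition, same result).


-- ===== PORT A =====
def pvKnownMarkersA : List String :=
  ["serialization_target:", "serialization:", "SVG target:", "layout_target:"]

-- hand port of marker.rstrip(":"): drops trailing ':' characters (exact: the argument is the one-char set {':'})
def pvRstripColonA (s : String) : String :=
  String.ofList ((s.toList.reverse.dropWhile (· = ':')).reverse)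

def extract_serialization_payload (text : String) : String × String :=
  if text = "" then ("", "empty")
  else
    let st := pvKnownMarkersA.foldl
      (fun (st : Option Int × Option String) marker =>
        let i := PySem.Str.find text marker
        match st.1 with
        | none => if 0 ≤ i then (some i, some marker) else st
        | some b => if 0 ≤ i ∧ i < b then (some i, some marker) else st)
      (none, none)
    match st with
    | (some bi, some bm) =>
        (PySem.Str.slice text (some (bi + PySem.Str.len bm)) none,
         "from_" ++ PySem.Str.replace (pvRstripColonA bm) " " "_")
    | _ => (text, "no_known_marker")

-- ===== PORT B =====
def pvKnownMarkersB : List String :=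
  ["serialization_target:", "serialization:", "SVG target:", "layout_target:"]

-- hand port of marker.rstrip(":"): drops trailing ':' characters (exact: the argument is the one-char set {':'})
def pvRstripColonB (s : String) : String :=
  String.ofList ((s.toList.reverse.dropWhile (· = ':')).reverse)

-- the 'for i in range(len(text)): for marker in …: if text.startswith(marker, i)' scan, as structural recursion on the suffix
def pvScanB (M : List String) : List Char → Option (List Char × String)
  | [] => none
  | c :: rest =>
    match M.find? (fun m => PySem.Chars.startswith (c :: rest) m.toList) with
    | some m => some ((c :: rest).drop m.toList.length, m)
    | none => pvScanB M rest

def extract_serialization_payload_alt (text : String) : String × String :=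
  if text = "" then ("", "empty")
  else
    match pvScanB pvKnownMarkersB text.toList with
    | some (suffix, m) =>
        (String.ofList suffix, "from_" ++ PySem.Str.replace (pvRstripColonB m) " " "_")
    | none => (text, "no_known_marker")

-- ===== PRECONDITION & SPEC =====
def Spec_extract_serialization_payload (text : String) (out : String × String) : Prop := out = extract_serialization_payload_alt text
instance (text : String) (out : String × String) : Decidable (Spec_extract_serialization_payload text out) := by unfold Spec_extract_serialization_payload; infer_instance

-- ===== CLAIM (what is proved, stated in full; the proofs are below) =====
def Claim_equal_extract_serialization_payload : Prop := ∀ (text : String), Dom_extract_serialization_payload text → Spec_extract_serialization_payload text (extract_serialization_payload text)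

-- ===== LEMMAS AND PROOFS =====

-- some marker of M starts at position j of l
def pvMatchesAt (M : List String) (l : List Char) (j : Nat) : Prop :=
  ∃ m ∈ M, m.toList <+: l.drop j

-- an occurrence bounds find from above (and find is then an index)
theorem pv_find_le_of_prefix_drop (l : List Char) (m : List Char) (i : Nat)
    (h : m <+: l.drop i) : 0 ≤ PySem.Chars.find l m ∧ PySem.Chars.find l m ≤ i := by
  have hin : PySem.Chars.isIn m l = true :=
    (PySem.Chars.exists_prefix_drop_iff_isIn (sub := m) (s := l)).mp ⟨i, h⟩
  have h0 : 0 ≤ PySem.Chars.find l m :=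
    (PySem.Chars.find_nonneg_iff l m).mpr (((PySem.Chars.isIn_iff_infix m l).mp hin))
  refine ⟨h0, ?_⟩
  by_contra hlt
  push Not at hlt
  exact ((PySem.Chars.find_spec h0).2 i (by omega) ) h

theorem pv_scan_none (M : List String) (l : List Char)
    (h : ∀ j, ¬ pvMatchesAt M l j) : pvScanB M l = none := by
  induction l with
  | nil => rfl
  | cons c rest ih =>
    have hfind : (M.find? (fun m => PySem.Chars.startswith (c :: rest) m.toList)) = none := by
      rw [List.find?_eq_none]
      intro m hm
      simp only [Bool.not_eq_true]
      by_contra hsw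
      simp only [Bool.not_eq_false] at hsw
      exact h 0 ⟨m, hm, by
        simpa using (PySem.Chars.startswith_iff (c :: rest) m.toList).mp hsw⟩
    rw [pvScanB, hfind]
    exact ih (fun j hj => h (j + 1) (by
      obtain ⟨m, hm, hp⟩ := hj
      exact ⟨m, hm, by simpa [List.drop_succ_cons] using hp⟩))

theorem pv_scan_found (M : List String) (l : List Char) (j : Nat) (m : String)
    (M₁ M₂ : List String) (hM : M = M₁ ++ m :: M₂) (hne : m.toList ≠ [])
    (hbefore : ∀ i < j, ¬ pvMatchesAt M l i)
    (hM₁ : ∀ m' ∈ M₁, ¬ m'.toList <+: l.drop j)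
    (hm : m.toList <+: l.drop j) :
    pvScanB M l = some (l.drop (j + m.toList.length), m) := by
  induction l generalizing j with
  | nil => exact absurd (List.prefix_nil.mp (by simpa using hm)) hne
  | cons c rest ih =>
    cases j with
    | zero =>
      have hfind : (M.find? (fun m' => PySem.Chars.startswith (c :: rest) m'.toList)) = some m := by
        subst hM
        rw [List.find?_append]
        have h1 : (M₁.find? (fun m' => PySem.Chars.startswith (c :: rest) m'.toList)) = none := by
          rw [List.find?_eq_none]
          intro m' hm'
          simp only [Bool.not_eq_true]
          by_contra hsw
          simp only [Bool.not_eq_false] at hsw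
          exact hM₁ m' hm' (by simpa using (PySem.Chars.startswith_iff (c :: rest) m'.toList).mp hsw)
        have h2 : ((m :: M₂).find? (fun m' => PySem.Chars.startswith (c :: rest) m'.toList)) = some m := by
          rw [List.find?_cons_of_pos]
          exact (PySem.Chars.startswith_iff (c :: rest) m.toList).mpr (by simpa using hm)
        rw [h1, h2]
        rfl
      rw [pvScanB, hfind]
      simp
    | succ k =>
      have hfind : (M.find? (fun m' => PySem.Chars.startswith (c :: rest) m'.toList)) = none := by
        rw [List.find?_eq_none]
        intro m' hm'
        simp only [Bool.not_eq_true]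
        by_contra hsw
        simp only [Bool.not_eq_false] at hsw
        exact hbefore 0 (by omega) ⟨m', hm', by
          simpa using (PySem.Chars.startswith_iff (c :: rest) m'.toList).mp hsw⟩
      rw [pvScanB, hfind]
      have hres := ih k
        (fun i hi hmi => hbefore (i + 1) (by omega) (by
          obtain ⟨m', hm', hp⟩ := hmi
          exact ⟨m', hm', by simpa [List.drop_succ_cons] using hp⟩))
        (fun m' hm' hp => hM₁ m' hm' (by simpa [List.drop_succ_cons] using hp))
        (by simpa [List.drop_succ_cons] using hm)
      rw [hres]
      have hd : (k + 1 + m.toList.length) = (k + m.toList.length) + 1 := by omega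
      rw [hd, List.drop_succ_cons]

theorem pv_AB_found (l : List Char) (j : Int) (m : String) (M₁ M₂ : List String)
    (hM : pvKnownMarkersB = M₁ ++ m :: M₂)
    (hj : PySem.Chars.find l m.toList = j) (hj0 : 0 ≤ j)
    (h₁ : ∀ m' ∈ M₁, PySem.Chars.find l m'.toList = -1 ∨ j < PySem.Chars.find l m'.toList)
    (h₂ : ∀ m' ∈ M₂, PySem.Chars.find l m'.toList = -1 ∨ j ≤ PySem.Chars.find l m'.toList) :
    pvScanB pvKnownMarkersB l = some (l.drop (j.toNat + m.toList.length), m) := by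
  have hne : m.toList ≠ [] := by
    have hmem : m ∈ pvKnownMarkersB := by rw [hM]; exact List.mem_append_right _ (List.mem_cons_self)
    simp only [pvKnownMarkersB, List.mem_cons, List.not_mem_nil, or_false] at hmem
    rcases hmem with h | h | h | h <;> subst h <;> simp
  have h0f : 0 ≤ PySem.Chars.find l m.toList := by rw [hj]; exact hj0
  have hmP : m.toList <+: l.drop j.toNat := by
    have := (PySem.Chars.find_spec h0f).1
    rwa [hj] at this
  refine pv_scan_found pvKnownMarkersB l j.toNat m M₁ M₂ hM hne ?_ ?_ hmP
  · intro i hi hmi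
    obtain ⟨m', hm', hp⟩ := hmi
    obtain ⟨hf0, hfle⟩ := pv_find_le_of_prefix_drop l m'.toList i hp
    rw [hM] at hm'
    rcases List.mem_append.mp hm' with h1 | h1
    · rcases h₁ m' h1 with he | he <;> omega
    · rcases List.mem_cons.mp h1 with he | he
      · subst he; omega
      · rcases h₂ m' he with he' | he' <;> omega
  · intro m' hm' hp
    obtain ⟨hf0, hfle⟩ := pv_find_le_of_prefix_drop l m'.toList j.toNat hp
    rcases h₁ m' hm' with he | he <;> omega

theorem pv_out_eq (text : String) (f : Int) (h0 : 0 ≤ f) (m : String) :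
    PySem.Str.slice text (some (f + PySem.Str.len m)) none
      = String.ofList (text.toList.drop (f.toNat + m.toList.length)) := by
  have h1 : 0 ≤ f + PySem.Str.len m := by simp only [PySem.Str.len_eq]; omega
  have h2 : (f + PySem.Str.len m).toNat = f.toNat + m.toList.length := by
    simp only [PySem.Str.len_eq]; omega
  simp only [PySem.Str.slice, PySem.Chars.slice_eq_listSlice]
  rw [PySem.List.slice_from _ h1, h2]

-- ===== VERDICT (by name: the statement is the Claim_ definition above) =====
theorem extract_serialization_payload_spec : Claim_equal_extract_serialization_payload := by
  intro text _hdom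
  show extract_serialization_payload text = extract_serialization_payload_alt text
  by_cases h0 : text = ""
  · subst h0; rfl
  · unfold extract_serialization_payload extract_serialization_payload_alt
    rw [if_neg h0, if_neg h0]
    simp only [pvKnownMarkersA, List.foldl_cons, List.foldl_nil, PySem.Str.find_eq]
    have g1 : -1 ≤ PySem.Chars.find text.toList "serialization_target:".toList := PySem.Chars.neg_one_le_find _ _
    have g2 : -1 ≤ PySem.Chars.find text.toList "serialization:".toList := PySem.Chars.neg_one_le_find _ _
    have g3 : -1 ≤ PySem.Chars.find text.toList "SVG target:".toList := PySem.Chars.neg_one_le_find _ _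
    have g4 : -1 ≤ PySem.Chars.find text.toList "layout_target:".toList := PySem.Chars.neg_one_le_find _ _
    by_cases c1 : (0:ℤ) ≤ PySem.Chars.find text.toList "serialization_target:".toList
    · rw [if_pos c1]
      try simp only []
      by_cases c2 : (0:ℤ) ≤ PySem.Chars.find text.toList "serialization:".toList ∧ PySem.Chars.find text.toList "serialization:".toList < PySem.Chars.find text.toList "serialization_target:".toList
      · rw [if_pos c2]
        try simp only []
        by_cases c3 : (0:ℤ) ≤ PySem.Chars.find text.toList "SVG target:".toList ∧ PySem.Chars.find text.toList "SVG target:".toList < PySem.Chars.find text.toList "serialization:".toList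
        · rw [if_pos c3]
          try simp only []
          by_cases c4 : (0:ℤ) ≤ PySem.Chars.find text.toList "layout_target:".toList ∧ PySem.Chars.find text.toList "layout_target:".toList < PySem.Chars.find text.toList "SVG target:".toList
          · rw [if_pos c4]
            rw [pv_AB_found text.toList (PySem.Chars.find text.toList "layout_target:".toList) "layout_target:" ["serialization_target:", "serialization:", "SVG target:"] [] rfl rfl (by omega)
                (by intro m' hm'; simp only [List.mem_cons, List.not_mem_nil, or_false] at hm'; rcases hm' with rfl|rfl|rfl <;> omega)
                (by intro m' hm'; simp at hm')]
            try simp only []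
            exact Prod.ext (pv_out_eq text _ (by omega) _) rfl
          · rw [if_neg c4]
            rw [pv_AB_found text.toList (PySem.Chars.find text.toList "SVG target:".toList) "SVG target:" ["serialization_target:", "serialization:"] ["layout_target:"] rfl rfl (by omega)
                (by intro m' hm'; simp only [List.mem_cons, List.not_mem_nil, or_false] at hm'; rcases hm' with rfl|rfl <;> omega)
                (by intro m' hm'; simp only [List.mem_cons, List.not_mem_nil, or_false] at hm'; rcases hm' with rfl; omega)]
            try simp only []
            exact Prod.ext (pv_out_eq text _ (by omega) _) rfl
        · rw [if_neg c3]
          try simp only []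
          by_cases c4 : (0:ℤ) ≤ PySem.Chars.find text.toList "layout_target:".toList ∧ PySem.Chars.find text.toList "layout_target:".toList < PySem.Chars.find text.toList "serialization:".toList
          · rw [if_pos c4]
            rw [pv_AB_found text.toList (PySem.Chars.find text.toList "layout_target:".toList) "layout_target:" ["serialization_target:", "serialization:", "SVG target:"] [] rfl rfl (by omega)
                (by intro m' hm'; simp only [List.mem_cons, List.not_mem_nil, or_false] at hm'; rcases hm' with rfl|rfl|rfl <;> omega)
                (by intro m' hm'; simp at hm')]
            try simp only []
            exact Prod.ext (pv_out_eq text _ (by omega) _) rfl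
          · rw [if_neg c4]
            rw [pv_AB_found text.toList (PySem.Chars.find text.toList "serialization:".toList) "serialization:" ["serialization_target:"] ["SVG target:", "layout_target:"] rfl rfl (by omega)
                (by intro m' hm'; simp only [List.mem_cons, List.not_mem_nil, or_false] at hm'; rcases hm' with rfl; omega)
                (by intro m' hm'; simp only [List.mem_cons, List.not_mem_nil, or_false] at hm'; rcases hm' with rfl|rfl <;> omega)]
            try simp only []
            exact Prod.ext (pv_out_eq text _ (by omega) _) rfl
      · rw [if_neg c2]
        try simp only []
        by_cases c3 : (0:ℤ) ≤ PySem.Chars.find text.toList "SVG target:".toList ∧ PySem.Chars.find text.toList "SVG target:".toList < PySem.Chars.find text.toList "serialization_target:".toList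
        · rw [if_pos c3]
          try simp only []
          by_cases c4 : (0:ℤ) ≤ PySem.Chars.find text.toList "layout_target:".toList ∧ PySem.Chars.find text.toList "layout_target:".toList < PySem.Chars.find text.toList "SVG target:".toList
          · rw [if_pos c4]
            rw [pv_AB_found text.toList (PySem.Chars.find text.toList "layout_target:".toList) "layout_target:" ["serialization_target:", "serialization:", "SVG target:"] [] rfl rfl (by omega)
                (by intro m' hm'; simp only [List.mem_cons, List.not_mem_nil, or_false] at hm'; rcases hm' with rfl|rfl|rfl <;> omega)
                (by intro m' hm'; simp at hm')]
            try simp only []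
            exact Prod.ext (pv_out_eq text _ (by omega) _) rfl
          · rw [if_neg c4]
            rw [pv_AB_found text.toList (PySem.Chars.find text.toList "SVG target:".toList) "SVG target:" ["serialization_target:", "serialization:"] ["layout_target:"] rfl rfl (by omega)
                (by intro m' hm'; simp only [List.mem_cons, List.not_mem_nil, or_false] at hm'; rcases hm' with rfl|rfl <;> omega)
                (by intro m' hm'; simp only [List.mem_cons, List.not_mem_nil, or_false] at hm'; rcases hm' with rfl; omega)]
            try simp only []
            exact Prod.ext (pv_out_eq text _ (by omega) _) rfl
        · rw [if_neg c3]
          try simp only []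
          by_cases c4 : (0:ℤ) ≤ PySem.Chars.find text.toList "layout_target:".toList ∧ PySem.Chars.find text.toList "layout_target:".toList < PySem.Chars.find text.toList "serialization_target:".toList
          · rw [if_pos c4]
            rw [pv_AB_found text.toList (PySem.Chars.find text.toList "layout_target:".toList) "layout_target:" ["serialization_target:", "serialization:", "SVG target:"] [] rfl rfl (by omega)
                (by intro m' hm'; simp only [List.mem_cons, List.not_mem_nil, or_false] at hm'; rcases hm' with rfl|rfl|rfl <;> omega)
                (by intro m' hm'; simp at hm')]
            try simp only []
            exact Prod.ext (pv_out_eq text _ (by omega) _) rfl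
          · rw [if_neg c4]
            rw [pv_AB_found text.toList (PySem.Chars.find text.toList "serialization_target:".toList) "serialization_target:" [] ["serialization:", "SVG target:", "layout_target:"] rfl rfl (by omega)
                (by intro m' hm'; simp at hm')
                (by intro m' hm'; simp only [List.mem_cons, List.not_mem_nil, or_false] at hm'; rcases hm' with rfl|rfl|rfl <;> omega)]
            try simp only []
            exact Prod.ext (pv_out_eq text _ (by omega) _) rfl
    · rw [if_neg c1]
      try simp only []
      by_cases c2 : (0:ℤ) ≤ PySem.Chars.find text.toList "serialization:".toList
      · rw [if_pos c2]
        try simp only []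
        by_cases c3 : (0:ℤ) ≤ PySem.Chars.find text.toList "SVG target:".toList ∧ PySem.Chars.find text.toList "SVG target:".toList < PySem.Chars.find text.toList "serialization:".toList
        · rw [if_pos c3]
          try simp only []
          by_cases c4 : (0:ℤ) ≤ PySem.Chars.find text.toList "layout_target:".toList ∧ PySem.Chars.find text.toList "layout_target:".toList < PySem.Chars.find text.toList "SVG target:".toList
          · rw [if_pos c4]
            rw [pv_AB_found text.toList (PySem.Chars.find text.toList "layout_target:".toList) "layout_target:" ["serialization_target:", "serialization:", "SVG target:"] [] rfl rfl (by omega)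
                (by intro m' hm'; simp only [List.mem_cons, List.not_mem_nil, or_false] at hm'; rcases hm' with rfl|rfl|rfl <;> omega)
                (by intro m' hm'; simp at hm')]
            try simp only []
            exact Prod.ext (pv_out_eq text _ (by omega) _) rfl
          · rw [if_neg c4]
            rw [pv_AB_found text.toList (PySem.Chars.find text.toList "SVG target:".toList) "SVG target:" ["serialization_target:", "serialization:"] ["layout_target:"] rfl rfl (by omega)
                (by intro m' hm'; simp only [List.mem_cons, List.not_mem_nil, or_false] at hm'; rcases hm' with rfl|rfl <;> omega)
                (by intro m' hm'; simp only [List.mem_cons, List.not_mem_nil, or_false] at hm'; rcases hm' with rfl; omega)]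
            try simp only []
            exact Prod.ext (pv_out_eq text _ (by omega) _) rfl
        · rw [if_neg c3]
          try simp only []
          by_cases c4 : (0:ℤ) ≤ PySem.Chars.find text.toList "layout_target:".toList ∧ PySem.Chars.find text.toList "layout_target:".toList < PySem.Chars.find text.toList "serialization:".toList
          · rw [if_pos c4]
            rw [pv_AB_found text.toList (PySem.Chars.find text.toList "layout_target:".toList) "layout_target:" ["serialization_target:", "serialization:", "SVG target:"] [] rfl rfl (by omega)
                (by intro m' hm'; simp only [List.mem_cons, List.not_mem_nil, or_false] at hm'; rcases hm' with rfl|rfl|rfl <;> omega)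
                (by intro m' hm'; simp at hm')]
            try simp only []
            exact Prod.ext (pv_out_eq text _ (by omega) _) rfl
          · rw [if_neg c4]
            rw [pv_AB_found text.toList (PySem.Chars.find text.toList "serialization:".toList) "serialization:" ["serialization_target:"] ["SVG target:", "layout_target:"] rfl rfl (by omega)
                (by intro m' hm'; simp only [List.mem_cons, List.not_mem_nil, or_false] at hm'; rcases hm' with rfl; omega)
                (by intro m' hm'; simp only [List.mem_cons, List.not_mem_nil, or_false] at hm'; rcases hm' with rfl|rfl <;> omega)]
            try simp only []
            exact Prod.ext (pv_out_eq text _ (by omega) _) rfl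
      · rw [if_neg c2]
        try simp only []
        by_cases c3 : (0:ℤ) ≤ PySem.Chars.find text.toList "SVG target:".toList
        · rw [if_pos c3]
          try simp only []
          by_cases c4 : (0:ℤ) ≤ PySem.Chars.find text.toList "layout_target:".toList ∧ PySem.Chars.find text.toList "layout_target:".toList < PySem.Chars.find text.toList "SVG target:".toList
          · rw [if_pos c4]
            rw [pv_AB_found text.toList (PySem.Chars.find text.toList "layout_target:".toList) "layout_target:" ["serialization_target:", "serialization:", "SVG target:"] [] rfl rfl (by omega)
                (by intro m' hm'; simp only [List.mem_cons, List.not_mem_nil, or_false] at hm'; rcases hm' with rfl|rfl|rfl <;> omega)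
                (by intro m' hm'; simp at hm')]
            try simp only []
            exact Prod.ext (pv_out_eq text _ (by omega) _) rfl
          · rw [if_neg c4]
            rw [pv_AB_found text.toList (PySem.Chars.find text.toList "SVG target:".toList) "SVG target:" ["serialization_target:", "serialization:"] ["layout_target:"] rfl rfl (by omega)
                (by intro m' hm'; simp only [List.mem_cons, List.not_mem_nil, or_false] at hm'; rcases hm' with rfl|rfl <;> omega)
                (by intro m' hm'; simp only [List.mem_cons, List.not_mem_nil, or_false] at hm'; rcases hm' with rfl; omega)]
            try simp only []
            exact Prod.ext (pv_out_eq text _ (by omega) _) rfl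
        · rw [if_neg c3]
          try simp only []
          by_cases c4 : (0:ℤ) ≤ PySem.Chars.find text.toList "layout_target:".toList
          · rw [if_pos c4]
            rw [pv_AB_found text.toList (PySem.Chars.find text.toList "layout_target:".toList) "layout_target:" ["serialization_target:", "serialization:", "SVG target:"] [] rfl rfl (by omega)
                (by intro m' hm'; simp only [List.mem_cons, List.not_mem_nil, or_false] at hm'; rcases hm' with rfl|rfl|rfl <;> omega)
                (by intro m' hm'; simp at hm')]
            try simp only []
            exact Prod.ext (pv_out_eq text _ (by omega) _) rfl
          · rw [if_neg c4]
            rw [pv_scan_none pvKnownMarkersB text.toList (by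
                intro j hmj
                obtain ⟨m', hm', hp⟩ := hmj
                obtain ⟨hf0, hfle⟩ := pv_find_le_of_prefix_drop text.toList m'.toList j hp
                simp only [pvKnownMarkersB, List.mem_cons, List.not_mem_nil, or_false] at hm'
                rcases hm' with rfl|rfl|rfl|rfl
                all_goals omega)]
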